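-- pv_equiv track=rewrite | github.com/krish8924/AI-based-Contract-Language-Simplifier | ease_chatbot_streamlit.py | extract_clause_headings
-- ===== SOURCE A (Python) =====
-- def extract_clause_headings(text):
--     """
--     Very simple heading/ clause detector: looks for common clause keywords and
--     capitalized lines (heuristic). Returns a list of (heading, sample_text).
--     """
--     headings = []
--     lines = [l.strip() for l in text.splitlines() if l.strip()]
--     clause_keywords = [
--         "Terminat", "Payment", "Confidential", "Governing Law", "Liabil", "Indemn",
--         "Force Majeure", "Intellectual Property", "Dispute", "Notice", "Warranty",
--         "Assignment", "Data Protection", "Privacy", "Breach", "Refund"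
--     ]
--     for i,l in enumerate(lines[:400]):  # limit for speed
--         # heuristic 1: uppercase short line
--         if len(l) < 80 and sum(1 for c in l if c.isupper()) > (len(l)*0.3):
--             headings.append((l, " ".join(lines[i+1:i+3])))
--             continue
--         # heuristic 2: contains keyword
--         for k in clause_keywords:
--             if k.lower() in l.lower():
--                 headings.append((l, " ".join(lines[i+1:i+3])))
--                 break
--     # dedupe
--     seen = set()
--     out = []
--     for h,s in headings:
--         if h.lower() not in seen:
--             seen.add(h.lower())
--             out.append((h,s))
--     return out[:40]
-- ===== SOURCE B (Python) =====
-- def extract_clause_headings(text):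
--     """
--     Single fused pass: detect, dedupe and truncate in one loop with incremental
--     seen-set state (same result as the detect-then-dedup-then-truncate original).
--     """
--     clause_keywords = [
--         "Terminat", "Payment", "Confidential", "Governing Law", "Liabil", "Indemn",
--         "Force Majeure", "Intellectual Property", "Dispute", "Notice", "Warranty",
--         "Assignment", "Data Protection", "Privacy", "Breach", "Refund"
--     ]
--     lines = [l.strip() for l in text.splitlines() if l.strip()]
--     seen = set()
--     out = []
--     for i, l in enumerate(lines[:400]):
--         low = l.lower()
--         is_heading = (len(l) < 80 and sum(1 for c in l if c.isupper()) > len(l) * 0.3) \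
--             or any(k.lower() in low for k in clause_keywords)
--         if is_heading and low not in seen:
--             seen.add(low)
--             out.append((l, " ".join(lines[i+1:i+3])))
--             if len(out) == 40:
--                 break
--     return out
-- ===== Notes on version B (the rewrite author's own statement) =====
-- stated objective: simpler
-- what changed: A's three phases (collect headings, dedupe with a seen set, truncate to 40) are fused into one pass that maintains the seen set and output directly and stops as soon as 40 headings are collected, collapsing A's two heuristic branches into a single is_heading boolean.
import Mathlib
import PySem

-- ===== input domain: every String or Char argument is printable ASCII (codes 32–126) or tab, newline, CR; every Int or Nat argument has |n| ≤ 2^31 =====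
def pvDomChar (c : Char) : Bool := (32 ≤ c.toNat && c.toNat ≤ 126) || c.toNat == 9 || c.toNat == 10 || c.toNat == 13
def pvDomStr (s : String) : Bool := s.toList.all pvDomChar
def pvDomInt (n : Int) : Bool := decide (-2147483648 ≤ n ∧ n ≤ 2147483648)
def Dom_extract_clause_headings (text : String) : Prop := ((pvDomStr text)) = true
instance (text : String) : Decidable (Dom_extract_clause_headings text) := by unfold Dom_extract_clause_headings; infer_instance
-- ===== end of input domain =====

-- B fuses A's detect-then-dedup-then-truncate phases into one pass with incremental seen-set state (same return value; objective: simpler).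


-- ===== PORT A =====
def pvClauseKeywords : List String :=
  ["Terminat", "Payment", "Confidential", "Governing Law", "Liabil", "Indemn",
   "Force Majeure", "Intellectual Property", "Dispute", "Notice", "Warranty",
   "Assignment", "Data Protection", "Privacy", "Breach", "Refund"]

-- lines = [l.strip() for l in text.splitlines() if l.strip()]  (truthiness = nonempty)
def pvLines (text : String) : List String :=
  ((PySem.Str.splitlines text).filter (fun l => PySem.Str.strip l != "")).map PySem.Str.strip

-- " ".join(lines[i+1:i+3])
def pvSample (lines : List String) (i : Int) : String :=
  PySem.Str.join " " (PySem.List.slice lines (some (i + 1)) (some (i + 3)))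

-- len(l) < 80 and sum(1 for c in l if c.isupper()) > len(l)*0.3
-- (for 0 ≤ len < 80 the double comparison 'cnt > len*0.3' is exactly the integer test 10*cnt > 3*len)
def pvIsUpperShort (l : String) : Bool :=
  PySem.Str.len l < 80 &&
    (10 * ((l.toList.filter PySem.Chars.isupper).length : Int) > 3 * PySem.Str.len l)

-- for k in clause_keywords: if k.lower() in l.lower(): <append>; break
def pvKwScan (l : String) : List String → Bool
  | [] => false
  | k :: ks =>
    if PySem.Str.isIn (PySem.Str.lower k) (PySem.Str.lower l) then true else pvKwScan l ks

-- the dedup loop body: if h.lower() not in seen: seen.add(h.lower()); out.append((h,s))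
def pvDedupStep (st : PySem.Set String × List (String × String)) (hs : String × String) :
    PySem.Set String × List (String × String) :=
  if !(PySem.Set.contains st.1 (PySem.Str.lower hs.1)) then
    (PySem.Set.add st.1 (PySem.Str.lower hs.1), st.2 ++ [hs])
  else st

def extract_clause_headings (text : String) : List (String × String) :=
  let lines := pvLines text
  let headings :=
    (PySem.List.enumerate (PySem.List.slice lines none (some 400))).foldl
      (fun acc il =>
        if pvIsUpperShort il.2 then acc ++ [(il.2, pvSample lines il.1)]
        else if pvKwScan il.2 pvClauseKeywords then acc ++ [(il.2, pvSample lines il.1)]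
        else acc) []
  let st := headings.foldl pvDedupStep (PySem.Set.empty, [])
  PySem.List.slice st.2 none (some 40)

-- ===== PORT B =====
-- the fused for-loop of Source B, with 'break' as early return once len(out) == 40
def pvAltLoop (lines : List String) (seen : PySem.Set String)
    (out : List (String × String)) : List (Int × String) → List (String × String)
  | [] => out
  | (i, l) :: rest =>
    let low := PySem.Str.lower l
    if (pvIsUpperShort l
          || pvClauseKeywords.any (fun k => PySem.Str.isIn (PySem.Str.lower k) low))
        && !(PySem.Set.contains seen low) then
      let out' := out ++ [(l, pvSample lines i)]
      if out'.length == 40 then out'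
      else pvAltLoop lines (PySem.Set.add seen low) out' rest
    else pvAltLoop lines seen out rest

def extract_clause_headings_alt (text : String) : List (String × String) :=
  let lines := pvLines text
  pvAltLoop lines PySem.Set.empty [] (PySem.List.enumerate (PySem.List.slice lines none (some 400)))

-- ===== PRECONDITION & SPEC =====
def Spec_extract_clause_headings (text : String) (out : List (String × String)) : Prop := out = extract_clause_headings_alt text
instance (text : String) (out : List (String × String)) : Decidable (Spec_extract_clause_headings text out) := by unfold Spec_extract_clause_headings; infer_instance

-- ===== CLAIM (what is proved, stated in full; the proofs are below) =====
def Claim_equal_extract_clause_headings : Prop := ∀ (text : String), Dom_extract_clause_headings text → Spec_extract_clause_headings text (extract_clause_headings text)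

-- ===== LEMMAS AND PROOFS =====

-- elements contributed by one enumerated line in A's heading-collection loop
def pvElts (lines : List String) (il : Int × String) : List (String × String) :=
  if pvIsUpperShort il.2 || pvKwScan il.2 pvClauseKeywords then [(il.2, pvSample lines il.1)]
  else []

theorem pvKwScan_eq_any (l : String) (ks : List String) :
    pvKwScan l ks = ks.any (fun k => PySem.Str.isIn (PySem.Str.lower k) (PySem.Str.lower l)) := by
  induction ks with
  | nil => rfl
  | cons k ks ih =>
    simp only [pvKwScan, List.any_cons, ih]
    split_ifs with h
    · simp only [h, Bool.true_or]
    · simp only [Bool.not_eq_true] at h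
      rw [h, Bool.false_or]

theorem pvFoldA_eq (lines : List String) (ps : List (Int × String))
    (acc : List (String × String)) :
    ps.foldl
      (fun acc il =>
        if pvIsUpperShort il.2 then acc ++ [(il.2, pvSample lines il.1)]
        else if pvKwScan il.2 pvClauseKeywords then acc ++ [(il.2, pvSample lines il.1)]
        else acc) acc
    = acc ++ ps.flatMap (pvElts lines) := by
  induction ps generalizing acc with
  | nil => simp
  | cons il rest ih =>
    simp only [List.foldl_cons, List.flatMap_cons, ih]
    unfold pvElts
    split_ifs with h1 h2 h3 h4 <;> simp_all

theorem pvDedup_prefix (hs : List (String × String))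
    (st : PySem.Set String × List (String × String)) :
    ∃ t, (hs.foldl pvDedupStep st).2 = st.2 ++ t := by
  induction hs generalizing st with
  | nil => exact ⟨[], by simp⟩
  | cons h rest ih =>
    simp only [List.foldl_cons]
    obtain ⟨t, ht⟩ := ih (pvDedupStep st h)
    unfold pvDedupStep at ht ⊢
    split_ifs at ht ⊢ with hc
    · exact ⟨[h] ++ t, by simpa using ht⟩
    · exact ⟨t, ht⟩

theorem pvAltLoop_eq (lines : List String) (ps : List (Int × String))
    (seen : PySem.Set String) (out : List (String × String)) (hlen : out.length < 40) :
    pvAltLoop lines seen out ps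
      = ((ps.flatMap (pvElts lines)).foldl pvDedupStep (seen, out)).2.take 40 := by
  induction ps generalizing seen out with
  | nil =>
    simp only [List.flatMap_nil, List.foldl_nil, pvAltLoop]
    exact (List.take_of_length_le (by omega)).symm
  | cons il rest ih =>
    obtain ⟨i, l⟩ := il
    simp only [List.flatMap_cons, List.foldl_append, pvAltLoop]
    by_cases hcond : (pvIsUpperShort l
        || pvClauseKeywords.any (fun k => PySem.Str.isIn (PySem.Str.lower k) (PySem.Str.lower l))) = true
    · -- the line is a heading
      have helt : pvElts lines (i, l) = [(l, pvSample lines i)] := by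
        unfold pvElts
        rw [if_pos]
        simpa [pvKwScan_eq_any] using hcond
      rw [helt]
      by_cases hseen : PySem.Set.contains seen (PySem.Str.lower l) = true
      · -- already seen: both drop it
        have hm : PySem.Str.lower l ∈ seen := by simpa using hseen
        have hstep : pvDedupStep (seen, out) (l, pvSample lines i) = (seen, out) := by
          unfold pvDedupStep; simp [hm]
        simp only [hcond, hseen, Bool.true_and, Bool.not_true, Bool.and_false,
          if_neg (by simp : ¬ (false = true)), List.foldl_cons, List.foldl_nil, hstep]
        exact ih seen out hlen
      · -- new heading
        have hm : PySem.Str.lower l ∉ seen := by simpa using hseen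
        have hstep : pvDedupStep (seen, out) (l, pvSample lines i)
            = (PySem.Set.add seen (PySem.Str.lower l), out ++ [(l, pvSample lines i)]) := by
          unfold pvDedupStep
          simp [hm]
        simp only [hcond, Bool.true_and, List.foldl_cons, List.foldl_nil, hstep]
        rw [if_pos (by simp [hcond, hm])]
        by_cases h40 : (out ++ [(l, pvSample lines i)]).length = 40
        · -- break: output is full
          rw [if_pos (by simpa using h40)]
          obtain ⟨t, ht⟩ := pvDedup_prefix (rest.flatMap (pvElts lines))
            (PySem.Set.add seen (PySem.Str.lower l), out ++ [(l, pvSample lines i)])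
          rw [ht, ← h40, List.take_left]
        · rw [if_neg (by simpa using h40)]
          have : (out ++ [(l, pvSample lines i)]).length < 40 := by
            simp only [List.length_append, List.length_cons, List.length_nil] at h40 ⊢
            omega
          exact ih _ _ this
    · -- not a heading: no element contributed
      have helt : pvElts lines (i, l) = [] := by
        unfold pvElts
        rw [if_neg]
        simpa [pvKwScan_eq_any] using hcond
      rw [Bool.not_eq_true] at hcond
      rw [if_neg (by rw [hcond, Bool.false_and]; simp), helt]
      simpa using ih seen out hlen

-- ===== VERDICT (by name: the statement is the Claim_ definition above) =====
theorem extract_clause_headings_spec : Claim_equal_extract_clause_headings := by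
  intro text _
  show extract_clause_headings text = extract_clause_headings_alt text
  unfold extract_clause_headings extract_clause_headings_alt
  dsimp only
  rw [pvFoldA_eq, pvAltLoop_eq _ _ _ _ (by simp)]
  rw [List.nil_append, PySem.List.slice_to _ (b := 40) (by norm_num)]
  rw [show Int.toNat 40 = 40 from rfl]
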